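-- pv_equiv track=rewrite | github.com/wllmnc/hackerRank | contest/w33/twin-arrays.py | twinArrays
-- ===== SOURCE A (Python) =====
-- def twinArrays(ar1, ar2):
--     A = dict((ar1[i],i) for i in range(len(ar1)))
--     B = dict((ar2[i],i) for i in range(len(ar2)))
--     ar1.sort()
--     ar2.sort()
--     sum_=ar2[0]+ar1[0]
--     if A[ar1[0]]== B[ar2[0]]:
--         if ar1[0]>ar2[0]:
--             sum_=ar2[0]+ar1[1]
--         elif ar1[0]==ar2[0] :
--             sum_=ar2[0]+min(ar1[1],ar2[1])
--         else:
--             sum_=ar1[0]+ar2[1]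
--     return sum_
-- ===== SOURCE B (Python) =====
-- def _scan(arr):
--     # one pass: smallest m, second-smallest s (with multiplicity), last index of m
--     m = arr[0]
--     s = None
--     last = 0
--     for i in range(1, len(arr)):
--         v = arr[i]
--         if v < m:
--             s = m
--             m = v
--             last = i
--         else:
--             if v == m:
--                 last = i
--             if s is None or v < s:
--                 s = v
--     return m, s, last
--
-- def twinArrays(ar1, ar2):
--     m1, s1, i1 = _scan(ar1)
--     m2, s2, i2 = _scan(ar2)
--     if i1 == i2:
--         if m1 > m2:
--             return m2 + s1
--         if m1 == m2:
--             return m2 + min(s1, s2)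
--         return m1 + s2
--     return m1 + m2
-- ===== Notes on version B (the rewrite author's own statement) =====
-- stated objective: faster
-- what changed: Replaced building two value-to-index dicts plus sorting both arrays in place by a single linear pass per array that tracks the minimum, the second-smallest value and the last index of the minimum (B also does not mutate its arguments).
import Mathlib
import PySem

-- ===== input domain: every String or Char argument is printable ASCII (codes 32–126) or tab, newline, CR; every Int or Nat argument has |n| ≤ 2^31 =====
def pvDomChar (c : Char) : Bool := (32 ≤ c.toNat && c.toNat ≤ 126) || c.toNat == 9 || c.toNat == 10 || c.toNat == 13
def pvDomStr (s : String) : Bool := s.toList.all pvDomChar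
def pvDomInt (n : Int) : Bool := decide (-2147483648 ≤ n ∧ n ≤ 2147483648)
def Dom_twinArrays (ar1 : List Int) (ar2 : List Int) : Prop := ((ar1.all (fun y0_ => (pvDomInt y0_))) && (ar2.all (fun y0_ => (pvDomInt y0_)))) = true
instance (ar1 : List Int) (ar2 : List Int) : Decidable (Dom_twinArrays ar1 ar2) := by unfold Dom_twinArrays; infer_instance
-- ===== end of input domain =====

-- B replaces A's sort-both-arrays-plus-index-dicts approach by a single linear pass per array
-- tracking the two smallest values and the last index of the minimum (objective: faster).
-- Note: Python A sorts both argument lists IN PLACE; B does not mutate. The claim is about the return value.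


-- ===== PORT A =====
-- A = dict((ar1[i], i) …); B = dict((ar2[i], i) …); sort both; branch on index equality of the minima.
def twinArrays (ar1 : List Int) (ar2 : List Int) : Int :=
  let dA := (PySem.List.enumerate ar1 0).foldl (fun d p => d.insert p.2 p.1) PySem.Dict.empty
  let dB := (PySem.List.enumerate ar2 0).foldl (fun d p => d.insert p.2 p.1) PySem.Dict.empty
  let s1 := PySem.List.sorted ar1 (fun x => x) false
  let s2 := PySem.List.sorted ar2 (fun x => x) false
  let a0 := PySem.List.pyGetD s1 0 0   -- ar1[0] after the sort (Pre_ excludes the IndexError)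
  let b0 := PySem.List.pyGetD s2 0 0
  let sum0 := b0 + a0
  if dA.get? a0 = dB.get? b0 then      -- A[ar1[0]] == B[ar2[0]]; both keys present, KeyError impossible
    if a0 > b0 then b0 + PySem.List.pyGetD s1 1 0
    else if a0 = b0 then b0 + min (PySem.List.pyGetD s1 1 0) (PySem.List.pyGetD s2 1 0)
    else a0 + PySem.List.pyGetD s2 1 0
  else sum0

-- ===== PORT B =====
-- one loop step of B's scan: state (m, s, last) = (min so far, second-smallest so far, last index of m)
def bStep (st : Int × Option Int × Int) (p : Int × Int) : Int × Option Int × Int :=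
  let (m, s, last) := st
  let (i, v) := p
  if v < m then (v, some m, i)
  else
    (m,
     (match s with | none => some v | some sv => if v < sv then some v else some sv),
     (if v = m then i else last))

def bScanList (arr : List Int) : Int × Option Int × Int :=
  (PySem.List.enumerate (arr.drop 1) 1).foldl bStep (PySem.List.pyGetD arr 0 0, none, 0)

def twinArrays_alt (ar1 : List Int) (ar2 : List Int) : Int :=
  let (m1, s1, i1) := bScanList ar1
  let (m2, s2, i2) := bScanList ar2
  if i1 = i2 then
    if m1 > m2 then m2 + s1.getD 0
    else if m1 = m2 then m2 + min (s1.getD 0) (s2.getD 0)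
    else m1 + s2.getD 0
  else m1 + m2

-- ===== PRECONDITION & SPEC =====
-- min of a nonempty list (0 for [], unused there)
def pvMin (l : List Int) : Int := match l with | [] => 0 | a :: t => t.foldl min a
-- index of the LAST occurrence of v in l (none if absent)
def lastIdx? : List Int → Int → Option Int
  | [], _ => none
  | a :: t, v =>
      match lastIdx? t v with
      | some j => some (j + 1)
      | none => if a = v then some 0 else none

-- Pre_ excludes exactly the inputs on which A raises IndexError: an empty list, or — when the last
-- occurrences of the two minima sit at the same index — a list of length 1 whose second element A reads.
def Pre_twinArrays (ar1 : List Int) (ar2 : List Int) : Prop :=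
  ar1 ≠ [] ∧ ar2 ≠ [] ∧
  (lastIdx? ar1 (pvMin ar1) = lastIdx? ar2 (pvMin ar2) →
    (pvMin ar2 ≤ pvMin ar1 → 2 ≤ ar1.length) ∧ (pvMin ar1 ≤ pvMin ar2 → 2 ≤ ar2.length))
instance (ar1 : List Int) (ar2 : List Int) : Decidable (Pre_twinArrays ar1 ar2) := by
  unfold Pre_twinArrays; infer_instance

def pvWitness_twinArrays : List Int × List Int := ([1, 2], [3, 4])

def Spec_twinArrays (ar1 : List Int) (ar2 : List Int) (out : Int) : Prop := out = twinArrays_alt ar1 ar2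
instance (ar1 : List Int) (ar2 : List Int) (out : Int) : Decidable (Spec_twinArrays ar1 ar2 out) := by
  unfold Spec_twinArrays; infer_instance

-- ===== CLAIM (what is proved, stated in full; the proofs are below) =====
def Claim_equal_twinArrays : Prop := ∀ (ar1 : List Int) (ar2 : List Int), Dom_twinArrays ar1 ar2 → Pre_twinArrays ar1 ar2 → Spec_twinArrays ar1 ar2 (twinArrays ar1 ar2)

-- ===== LEMMAS AND PROOFS =====

-- second-smallest (with multiplicity) of l, as B maintains it
def secD (l : List Int) : Option Int :=
  if l.length ≤ 1 then none else some (pvMin (l.erase (pvMin l)))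
-- last index of the minimum, as an Int
def lastD (l : List Int) : Int := (lastIdx? l (pvMin l)).getD 0

theorem pvMin_le (l : List Int) (h : l ≠ []) : ∀ y ∈ l, pvMin l ≤ y := by
  match l with
  | a :: t =>
    intro y hy
    have h1 : PySem.List.min? (a :: t) (fun y => y) = some (t.foldl min a) :=
      PySem.List.min?_id_cons a t
    simpa [pvMin] using PySem.List.min?_isMin h1 y hy

theorem pvMin_mem (l : List Int) (h : l ≠ []) : pvMin l ∈ l := by
  match l with
  | a :: t =>
    have h1 : PySem.List.min? (a :: t) (fun y => y) = some (t.foldl min a) :=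
      PySem.List.min?_id_cons a t
    simpa [pvMin] using PySem.List.min?_mem h1

theorem pvMin_append_singleton (l : List Int) (h : l ≠ []) (x : Int) :
    pvMin (l ++ [x]) = min (pvMin l) x := by
  match l with
  | a :: t => simp [pvMin, List.foldl_append]

theorem lastIdx?_append_singleton (l : List Int) (x v : Int) :
    lastIdx? (l ++ [x]) v = if v = x then some (l.length : Int) else lastIdx? l v := by
  induction l with
  | nil =>
    by_cases h : v = x
    · simp [lastIdx?, h]
    · simp only [List.nil_append, lastIdx?, if_neg h]
      exact (if_neg (fun hx : x = v => h hx.symm)).symm ▸ rfl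
  | cons a t ih =>
    by_cases h : v = x
    · subst h
      rw [List.cons_append, lastIdx?, ih]
      simp
    · rw [List.cons_append, lastIdx?, ih, if_neg h, if_neg h, lastIdx?]

theorem lastIdx?_mem (l : List Int) (v : Int) (h : v ∈ l) : ∃ j, lastIdx? l v = some j := by
  induction l with
  | nil => cases h
  | cons a t ih =>
    by_cases ht : v ∈ t
    · obtain ⟨j, hj⟩ := ih ht
      exact ⟨j + 1, by simp [lastIdx?, hj]⟩
    · have hv : a = v := by
        rcases List.mem_cons.mp h with h' | h'
        · exact h'.symm
        · exact absurd h' ht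
      cases hl : lastIdx? t v with
      | none => exact ⟨0, by simp [lastIdx?, hl, hv]⟩
      | some j => exact ⟨j + 1, by simp [lastIdx?, hl]⟩

theorem lastIdx?_min_eq (l : List Int) (h : l ≠ []) : lastIdx? l (pvMin l) = some (lastD l) := by
  obtain ⟨j, hj⟩ := lastIdx?_mem l (pvMin l) (pvMin_mem l h)
  simp [lastD, hj]

-- the dict comprehension in A maps each value to its LAST index
theorem dict_get_lastIdx (l : List Int) (v : Int) :
    ((PySem.List.enumerate l 0).foldl (fun d p => d.insert p.2 p.1) PySem.Dict.empty).get? v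
      = lastIdx? l v := by
  induction l using List.reverseRecOn with
  | nil => simp [PySem.List.enumerate_nil, lastIdx?, PySem.Dict.get?_empty]
  | append_singleton l x ih =>
    rw [PySem.List.enumerate_append, List.foldl_append, lastIdx?_append_singleton]
    simp only [PySem.List.enumerate_cons, PySem.List.enumerate_nil, List.foldl_cons,
      List.foldl_nil]
    rw [PySem.Dict.get?_insert, ih]
    by_cases h : v = x <;> simp [h]

-- B's scan computes (min, second-smallest, last index of the min)
theorem bScan_spec (a : Int) (t : List Int) :
    bScanList (a :: t) = (pvMin (a :: t), secD (a :: t), lastD (a :: t)) := by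
  induction t using List.reverseRecOn with
  | nil => simp [bScanList, pvMin, secD, lastD, lastIdx?, PySem.List.enumerate_nil, pysem]
  | append_singleton t' x ih =>
    have hne : (a :: t') ≠ [] := by simp
    have hLHS : bScanList ((a :: t') ++ [x])
        = bStep (bScanList (a :: t')) ((1 + (t'.length : Int)), x) := by
      simp only [bScanList, List.cons_append, List.drop_succ_cons, List.drop_zero,
        PySem.List.enumerate_append, PySem.List.enumerate_cons, PySem.List.enumerate_nil,
        List.foldl_append, List.foldl_cons, List.foldl_nil, PySem.List.pyGetD_zero_cons]
    rw [← List.cons_append, hLHS, ih]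
    have hmin := pvMin_append_singleton (a :: t') hne x
    rcases lt_trichotomy x (pvMin (a :: t')) with hx | hx | hx
    · -- new strict minimum at the end
      have hxnot : x ∉ (a :: t') := fun hmem => absurd (pvMin_le _ hne x hmem) (by omega)
      have hmin' : pvMin ((a :: t') ++ [x]) = x := by
        rw [hmin, min_eq_right (le_of_lt hx)]
      have herase : ((a :: t') ++ [x]).erase x = a :: t' := by
        rw [List.erase_append_right _ hxnot]; simp
      have hlast : lastD ((a :: t') ++ [x]) = 1 + (t'.length : Int) := by
        unfold lastD
        rw [hmin', lastIdx?_append_singleton, if_pos rfl]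
        simp [Option.getD]; ring
      have hsec : secD ((a :: t') ++ [x]) = some (pvMin (a :: t')) := by
        unfold secD
        rw [if_neg (by simp), hmin', herase]
      rw [hmin', hlast, hsec]
      simp only [bStep]
      rw [if_pos hx]
    · -- equal to the current minimum: last index moves to the end
      have hmin' : pvMin ((a :: t') ++ [x]) = pvMin (a :: t') := by
        rw [hmin, hx, min_self]
      have hmem : pvMin (a :: t') ∈ (a :: t') := pvMin_mem _ hne
      have herase : ((a :: t') ++ [x]).erase (pvMin (a :: t'))
          = (a :: t').erase (pvMin (a :: t')) ++ [x] := List.erase_append_left _ hmem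
      have hlast : lastD ((a :: t') ++ [x]) = 1 + (t'.length : Int) := by
        unfold lastD
        rw [hmin', lastIdx?_append_singleton, if_pos hx.symm]
        simp [Option.getD]; ring
      have hsec : secD ((a :: t') ++ [x]) = some (pvMin ((a :: t').erase (pvMin (a :: t')) ++ [x])) := by
        unfold secD
        rw [if_neg (by simp), hmin', herase]
      rw [hmin', hlast, hsec]
      simp only [bStep]
      rw [if_neg (by omega), if_pos hx]
      -- second component
      cases t' with
      | nil =>
        have h3 : ([a].erase (pvMin [a]) ++ [x]) = [x] := by
          simp [show pvMin [a] = a from rfl]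
        rw [show secD [a] = none from rfl, h3]
        rfl
      | cons b t'' =>
        have hlen2 : ¬ ((a :: b :: t'').length ≤ 1) := by simp
        have hsv : secD (a :: b :: t'') = some (pvMin ((a :: b :: t'').erase (pvMin (a :: b :: t'')))) := by
          unfold secD; rw [if_neg hlen2]
        have herne : (a :: b :: t'').erase (pvMin (a :: b :: t'')) ≠ [] := by
          have := List.length_erase_of_mem (pvMin_mem (a :: b :: t'') (by simp))
          intro hnil
          rw [hnil] at this
          simp at this
        rw [hsv, pvMin_append_singleton _ herne]
        simp only [Prod.mk.injEq, true_and]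
        constructor
        · by_cases hvs : x < pvMin ((a :: b :: t'').erase (pvMin (a :: b :: t'')))
          · rw [if_pos hvs, min_eq_right (le_of_lt hvs)]
          · rw [if_neg hvs, min_eq_left (by omega)]
        · trivial
    · -- strictly larger: min and its last index unchanged
      have hmin' : pvMin ((a :: t') ++ [x]) = pvMin (a :: t') := by
        rw [hmin, min_eq_left (le_of_lt hx)]
      have hmem : pvMin (a :: t') ∈ (a :: t') := pvMin_mem _ hne
      have herase : ((a :: t') ++ [x]).erase (pvMin (a :: t'))
          = (a :: t').erase (pvMin (a :: t')) ++ [x] := List.erase_append_left _ hmem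
      have hlast : lastD ((a :: t') ++ [x]) = lastD (a :: t') := by
        unfold lastD
        rw [hmin', lastIdx?_append_singleton, if_neg (by omega), lastIdx?_min_eq _ hne]
      have hsec : secD ((a :: t') ++ [x]) = some (pvMin ((a :: t').erase (pvMin (a :: t')) ++ [x])) := by
        unfold secD
        rw [if_neg (by simp), hmin', herase]
      rw [hmin', hlast, hsec]
      simp only [bStep]
      rw [if_neg (by omega), if_neg (by omega)]
      cases t' with
      | nil =>
        have h3 : ([a].erase (pvMin [a]) ++ [x]) = [x] := by
          simp [show pvMin [a] = a from rfl]
        rw [show secD [a] = none from rfl, h3]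
        rfl
      | cons b t'' =>
        have hlen2 : ¬ ((a :: b :: t'').length ≤ 1) := by simp
        have hsv : secD (a :: b :: t'') = some (pvMin ((a :: b :: t'').erase (pvMin (a :: b :: t'')))) := by
          unfold secD; rw [if_neg hlen2]
        have herne : (a :: b :: t'').erase (pvMin (a :: b :: t'')) ≠ [] := by
          have := List.length_erase_of_mem (pvMin_mem (a :: b :: t'') (by simp))
          intro hnil
          rw [hnil] at this
          simp at this
        rw [hsv, pvMin_append_singleton _ herne]
        simp only [Prod.mk.injEq, true_and]
        constructor
        · by_cases hvs : x < pvMin ((a :: b :: t'').erase (pvMin (a :: b :: t'')))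
          · rw [if_pos hvs, min_eq_right (le_of_lt hvs)]
          · rw [if_neg hvs, min_eq_left (by omega)]
        · trivial

-- the sorted list starts with the min, its tail is a permutation of l.erase (min), still ordered
theorem sorted_head_min (l : List Int) (h : l ≠ []) :
    ∃ rest, PySem.List.sorted l (fun x => x) false = pvMin l :: rest ∧
      rest.Perm (l.erase (pvMin l)) ∧ rest.Pairwise (· ≤ ·) := by
  cases hs : PySem.List.sorted l (fun x => x) false with
  | nil =>
    exact absurd ((PySem.List.sorted_eq_nil_iff l (fun x => x) false).mp hs) h
  | cons m0 rest =>
    have hperm : (m0 :: rest).Perm l := hs ▸ PySem.List.sorted_perm l (fun x => x) false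
    have hm0l : m0 ∈ l := hperm.subset List.mem_cons_self
    have hm0 : m0 = pvMin l :=
      le_antisymm (PySem.List.key_head_sorted_le l (fun x => x) hs (pvMin l) (pvMin_mem l h))
        (pvMin_le l h m0 hm0l)
    have hpw : (m0 :: rest).Pairwise (· ≤ ·) := by
      have := PySem.List.sorted_pairwise l (fun x => x) -- Pairwise (fun a b => a ≤ b)
      rw [hs] at this
      exact this
    refine ⟨rest, by rw [← hm0], ?_, hpw.of_cons⟩
    have := (List.cons_perm_iff_perm_erase.mp hperm).2
    rw [hm0] at this
    exact this

-- the head of an ordered permutation of u is the min of u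
theorem head_perm_min (u : List Int) (r : Int) (rest' : List Int)
    (hperm : (r :: rest').Perm u) (hpw : (r :: rest').Pairwise (· ≤ ·)) : r = pvMin u := by
  have hu : u ≠ [] := by
    intro hnil
    subst hnil
    exact absurd hperm.length_eq (by simp)
  have hr : r ∈ u := hperm.subset List.mem_cons_self
  refine le_antisymm ?_ (pvMin_le u hu r hr)
  have hmem : pvMin u ∈ (r :: rest') := hperm.symm.subset (pvMin_mem u hu)
  rcases List.mem_cons.mp hmem with h | h
  · exact le_of_eq h.symm
  · exact List.rel_of_pairwise_cons hpw h

-- the second element of the sorted list / B's second-smallest coincide, given length ≥ 2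
theorem rest_ne_nil (l : List Int) (h : l ≠ []) (h2 : 2 ≤ l.length)
    (rest : List Int) (hperm : rest.Perm (l.erase (pvMin l))) : rest ≠ [] := by
  intro hnil
  subst hnil
  have := hperm.length_eq
  rw [List.length_erase_of_mem (pvMin_mem l h)] at this
  simp at this
  omega

theorem secD_of_two_le (l : List Int) (h2 : 2 ≤ l.length) :
    secD l = some (pvMin (l.erase (pvMin l))) := by
  unfold secD
  rw [if_neg (by omega)]

-- ===== VERDICT (by name: the statement is the Claim_ definition above) =====
theorem twinArrays_spec : Claim_equal_twinArrays := by
  unfold Claim_equal_twinArrays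
  intro ar1 ar2 hdom hpre
  obtain ⟨h1, h2, h3⟩ := hpre
  unfold Spec_twinArrays
  obtain ⟨a, t1, rfl⟩ := List.exists_cons_of_ne_nil h1
  obtain ⟨b, t2, rfl⟩ := List.exists_cons_of_ne_nil h2
  obtain ⟨rest1, hs1, hperm1, hpw1⟩ := sorted_head_min (a :: t1) h1
  obtain ⟨rest2, hs2, hperm2, hpw2⟩ := sorted_head_min (b :: t2) h2
  have hb1 := bScan_spec a t1
  have hb2 := bScan_spec b t2
  simp only [twinArrays, twinArrays_alt, hb1, hb2, hs1, hs2,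
    dict_get_lastIdx, lastIdx?_min_eq _ h1, lastIdx?_min_eq _ h2,
    PySem.List.pyGetD_zero_cons, Option.some.injEq]
  by_cases hL : lastD (a :: t1) = lastD (b :: t2)
  · rw [if_pos hL, if_pos hL]
    have h3' := h3 (by rw [lastIdx?_min_eq _ h1, lastIdx?_min_eq _ h2, hL])
    rcases lt_trichotomy (pvMin (b :: t2)) (pvMin (a :: t1)) with hx | hx | hx
    · -- ar1's min is larger: A reads ar1[1]
      have hlen1 : 2 ≤ (a :: t1).length := h3'.1 (le_of_lt hx)
      obtain ⟨r1, rest1', rfl⟩ :=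
        List.exists_cons_of_ne_nil (rest_ne_nil _ h1 hlen1 rest1 hperm1)
      have hr1 : r1 = pvMin ((a :: t1).erase (pvMin (a :: t1))) :=
        head_perm_min _ _ _ hperm1 hpw1
      rw [if_pos hx, if_pos hx, secD_of_two_le _ hlen1]
      simp [pysem, hr1]
    · -- equal minima: A reads both second elements
      have hlen1 : 2 ≤ (a :: t1).length := h3'.1 (le_of_eq hx)
      have hlen2 : 2 ≤ (b :: t2).length := h3'.2 (le_of_eq hx.symm)
      obtain ⟨r1, rest1', rfl⟩ :=
        List.exists_cons_of_ne_nil (rest_ne_nil _ h1 hlen1 rest1 hperm1)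
      obtain ⟨r2, rest2', rfl⟩ :=
        List.exists_cons_of_ne_nil (rest_ne_nil _ h2 hlen2 rest2 hperm2)
      have hr1 : r1 = pvMin ((a :: t1).erase (pvMin (a :: t1))) :=
        head_perm_min _ _ _ hperm1 hpw1
      have hr2 : r2 = pvMin ((b :: t2).erase (pvMin (b :: t2))) :=
        head_perm_min _ _ _ hperm2 hpw2
      rw [hx]
      simp [pysem, hr1, hr2, hx, secD_of_two_le _ hlen1, secD_of_two_le _ hlen2]
    · -- ar2's min is larger: A reads ar2[1]
      have hlen2 : 2 ≤ (b :: t2).length := h3'.2 (le_of_lt hx)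
      obtain ⟨r2, rest2', rfl⟩ :=
        List.exists_cons_of_ne_nil (rest_ne_nil _ h2 hlen2 rest2 hperm2)
      have hr2 : r2 = pvMin ((b :: t2).erase (pvMin (b :: t2))) :=
        head_perm_min _ _ _ hperm2 hpw2
      rw [if_neg (by omega), if_neg (by omega), if_neg (by omega), if_neg (by omega),
        secD_of_two_le _ hlen2]
      simp [pysem, hr2]
  · rw [if_neg hL, if_neg hL]
    ring
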